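-- pv_equiv track=rewrite | github.com/AbduazizKayumov/Algo | hackerrank/interview_prep_kit/dictionaries_hashmaps.py | freqQuery
-- ===== SOURCE A (Python) =====
-- def freqQuery(queries):
--     answer = []
--
--     arr = {}
--     freq = {}
--
--     INSERT = 1
--     DELETE = 2
--     CHECK_FREQ = 3
--
--     for q in queries:
--         command = q[0]
--         value = q[1]
--         if command == INSERT:
--             if value not in arr:
--                 arr[value] = 1
--                 if 1 not in freq:
--                     freq[1] = set()
--                 freq[1].add(value)
--             else:
--                 f = arr[value]
--                 arr[value] += 1
--
--                 if f in freq: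
--                     freq[f].remove(value)
--                     if len(freq[f]) == 0:
--                         freq.pop(f)
--
--                 if arr[value] not in freq:
--                     freq[arr[value]] = set()
--                 freq[arr[value]].add(value)
--         elif command == DELETE:
--             if value in arr:
--                 f = arr[value]
--                 arr[value] -= 1
--
--                 if f in freq:
--                     freq[f].remove(value)
--                     if len(freq[f]) == 0:
--                         freq.pop(f)
--
--                 if arr[value] <= 0:
--                     arr.pop(value)
--                 else:
--                     if arr[value] not in freq:
--                         freq[arr[value]] = set()
--                     freq[arr[value]].add(value)
--         elif command == CHECK_FREQ:
--             if value in freq: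
--                 answer.append(1)
--             else:
--                 answer.append(0)
--
--     return answer
-- ===== SOURCE B (Python) =====
-- def freqQuery(queries):
--     answer = []
--     counts = {}
--     for command, value in queries:
--         if command == 1:
--             counts[value] = counts.get(value, 0) + 1
--         elif command == 2:
--             c = counts.get(value, 0)
--             if c > 1:
--                 counts[value] = c - 1
--             elif c == 1:
--                 del counts[value]
--         elif command == 3:
--             answer.append(1 if value in counts.values() else 0)
--     return answer
-- ===== Notes on version B (the rewrite author's own statement) =====
-- stated objective: simpler
-- what changed: B drops A's maintained frequency->set auxiliary index entirely and keeps only a single element->count dict, answering each frequency check by scanning the dict's values instead of looking the frequency up in the index.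
import Mathlib
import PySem

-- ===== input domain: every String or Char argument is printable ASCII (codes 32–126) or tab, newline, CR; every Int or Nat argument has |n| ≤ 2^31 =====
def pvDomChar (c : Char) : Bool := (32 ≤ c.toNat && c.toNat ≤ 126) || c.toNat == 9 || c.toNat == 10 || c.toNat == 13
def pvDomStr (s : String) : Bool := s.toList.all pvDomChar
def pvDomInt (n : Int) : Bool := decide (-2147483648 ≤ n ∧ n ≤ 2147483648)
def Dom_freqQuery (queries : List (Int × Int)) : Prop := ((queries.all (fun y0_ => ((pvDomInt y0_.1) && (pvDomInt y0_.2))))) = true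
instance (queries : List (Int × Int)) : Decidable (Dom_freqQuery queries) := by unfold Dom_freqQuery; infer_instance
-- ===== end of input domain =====

-- B replaces A's maintained frequency→set index by a single element→count dict whose
-- values are scanned on each frequency check (objective: simpler).

-- ===== PORT A =====
-- helper for the Python block  `if f in freq: freq[f].remove(value); if len(freq[f]) == 0: freq.pop(f)`
-- (repeated verbatim in A's INSERT and DELETE branches).  Set.remove? none = KeyError; on every state
-- A reaches, value ∈ freq[f] whenever f ∈ freq (proved by the invariant `RepF` below), so Python's
-- .remove never raises and the .getD fallback is never taken.
def bucketRemove (freq : PySem.Dict Int (PySem.Set Int)) (f value : Int) : PySem.Dict Int (PySem.Set Int) :=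
  if freq.contains f = true then
    let s := ((freq.getD f PySem.Set.empty).remove? value).getD (freq.getD f PySem.Set.empty)
    let freq1 := freq.insert f s
    if PySem.Set.len (freq1.getD f PySem.Set.empty) = 0 then freq1.erase f else freq1
  else freq

-- helper for the Python block  `if k not in freq: freq[k] = set(); freq[k].add(value)`
-- (appears verbatim three times in A, with k = 1 resp. k = arr[value]).
def bucketAdd (freq : PySem.Dict Int (PySem.Set Int)) (k value : Int) : PySem.Dict Int (PySem.Set Int) :=
  let freq1 := if freq.contains k = false then freq.insert k PySem.Set.empty else freq
  freq1.insert k (PySem.Set.add (freq1.getD k PySem.Set.empty) value)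

-- one iteration of A's `for q in queries` loop (INSERT = 1, DELETE = 2, CHECK_FREQ = 3)
def stepA (st : List Int × PySem.Dict Int Int × PySem.Dict Int (PySem.Set Int)) (q : Int × Int) :
    List Int × PySem.Dict Int Int × PySem.Dict Int (PySem.Set Int) :=
  let answer := st.1
  let arr := st.2.1
  let freq := st.2.2
  let command := q.1
  let value := q.2
  if command = 1 then
    if arr.contains value = false then
      (answer, arr.insert value 1, bucketAdd freq 1 value)
    else
      let f := arr.getD value 0                                -- f = arr[value]  (present)
      let arr' := arr.insert value (arr.getD value 0 + 1)      -- arr[value] += 1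
      (answer, arr', bucketAdd (bucketRemove freq f value) (arr'.getD value 0) value)
  else if command = 2 then
    if arr.contains value = true then
      let f := arr.getD value 0
      let arr' := arr.insert value (arr.getD value 0 - 1)      -- arr[value] -= 1
      let freqR := bucketRemove freq f value
      if arr'.getD value 0 ≤ 0 then
        (answer, arr'.erase value, freqR)                      -- arr.pop(value)
      else
        (answer, arr', bucketAdd freqR (arr'.getD value 0) value)
    else (answer, arr, freq)
  else if command = 3 then
    (answer ++ [if freq.contains value = true then (1 : Int) else 0], arr, freq)
  else (answer, arr, freq)

def freqQuery (queries : List (Int × Int)) : List Int :=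
  (queries.foldl stepA ([], PySem.Dict.empty, PySem.Dict.empty)).1

-- ===== PORT B =====
-- one iteration of B's loop: a single counts dict; CHECK scans counts.values()
def stepB (st : List Int × PySem.Dict Int Int) (q : Int × Int) :
    List Int × PySem.Dict Int Int :=
  let answer := st.1
  let counts := st.2
  let command := q.1
  let value := q.2
  if command = 1 then
    (answer, counts.insert value (counts.getD value 0 + 1))
  else if command = 2 then
    let c := counts.getD value 0
    if 1 < c then (answer, counts.insert value (c - 1))
    else if c = 1 then (answer, counts.erase value)
    else (answer, counts)
  else if command = 3 then
    (answer ++ [if counts.values.contains value = true then (1 : Int) else 0], counts)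
  else (answer, counts)

def freqQuery_alt (queries : List (Int × Int)) : List Int :=
  (queries.foldl stepB ([], PySem.Dict.empty)).1

-- ===== PRECONDITION & SPEC =====
def Spec_freqQuery (queries : List (Int × Int)) (out : List Int) : Prop := out = freqQuery_alt queries
instance (queries : List (Int × Int)) (out : List Int) : Decidable (Spec_freqQuery queries out) := by unfold Spec_freqQuery; infer_instance

-- ===== CLAIM (what is proved, stated in full; the proofs are below) =====
def Claim_equal_freqQuery : Prop := ∀ (queries : List (Int × Int)), Dom_freqQuery queries → Spec_freqQuery queries (freqQuery queries)

-- ===== LEMMAS AND PROOFS =====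

-- `freq` represents the fibers of the abstract count function g: a frequency is a key of freq
-- exactly when it is hit by g, and the set stored there is exactly g's fiber.
def RepF (g : Int → Option Int) (freq : PySem.Dict Int (PySem.Set Int)) : Prop :=
  freq.keys.Nodup ∧
  (∀ k : Int, freq.contains k = true ↔ ∃ v, g v = some k) ∧
  (∀ k s, freq.get? k = some s → s.Nodup ∧ ∀ v : Int, v ∈ s ↔ g v = some k)

def InvAB (arr : PySem.Dict Int Int) (freq : PySem.Dict Int (PySem.Set Int)) : Prop :=
  arr.keys.Nodup ∧ (∀ v k : Int, arr.get? v = some k → 1 ≤ k) ∧ RepF (fun v => arr.get? v) freq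

theorem find?_filter_ne {ν : Type} (l : List (Int × ν)) (k k' : Int) :
    List.find? (fun p => p.1 == k') (l.filter (fun p => !(p.1 == k))) =
      if k' = k then none else List.find? (fun p => p.1 == k') l := by
  induction l with
  | nil => simp
  | cons p l ih =>
    by_cases hpk : p.1 = k
    · rw [List.filter_cons_of_neg (by simp [hpk]), ih]
      by_cases hk' : k' = k
      · simp [hk']
      · rw [List.find?_cons_of_neg (by simp [hpk]; omega)]
    · rw [List.filter_cons_of_pos (by simp [hpk])]
      by_cases hpk' : p.1 = k'
      · have hk' : ¬ (k' = k) := by omega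
        rw [List.find?_cons_of_pos (by simp [hpk']), if_neg hk',
          List.find?_cons_of_pos (by simp [hpk'])]
      · rw [List.find?_cons_of_neg (by simp [hpk']), ih]
        by_cases hk' : k' = k
        · simp [hk']
        · rw [if_neg hk', if_neg hk', List.find?_cons_of_neg (by simp [hpk'])]

theorem get?_erase {ν : Type} (d : PySem.Dict Int ν) (k k' : Int) :
    (d.erase k).get? k' = if k' = k then none else d.get? k' := by
  obtain ⟨l⟩ := d
  simp only [PySem.Dict.erase, PySem.Dict.get?, find?_filter_ne]
  split <;> rfl

theorem nodup_keys_erase {ν : Type} (d : PySem.Dict Int ν) (k : Int) (h : d.keys.Nodup) :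
    (d.erase k).keys.Nodup := by
  obtain ⟨l⟩ := d
  simp only [PySem.Dict.erase, PySem.Dict.keys] at *
  exact List.Nodup.sublist (List.Sublist.map _ List.filter_sublist) h

theorem contains_erase {ν : Type} (d : PySem.Dict Int ν) (k k' : Int) :
    (d.erase k).contains k' = if k' = k then false else d.contains k' := by
  rw [PySem.Dict.contains_eq_isSome_get?, PySem.Dict.contains_eq_isSome_get?, get?_erase]
  split <;> rfl

theorem filter_ne_map_overwrite {ν : Type} (l : List (Int × ν)) (k : Int) (v : ν) :
    List.filter (fun p => !(p.1 == k)) (l.map (fun p => if (p.1 == k) = true then (k, v) else p)) =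
      List.filter (fun p => !(p.1 == k)) l := by
  induction l with
  | nil => simp
  | cons p l ih =>
    rw [List.map_cons]
    by_cases hpk : (p.1 == k) = true
    · rw [if_pos hpk, List.filter_cons_of_neg (by simp),
        List.filter_cons_of_neg (by simp [hpk]), ih]
    · rw [if_neg hpk, List.filter_cons_of_pos (by simpa using hpk),
        List.filter_cons_of_pos (by simpa using hpk), ih]

theorem insert_erase_self {ν : Type} (d : PySem.Dict Int ν) (k : Int) (v : ν)
    (h : d.contains k = true) : (d.insert k v).erase k = d.erase k := by
  obtain ⟨l⟩ := d
  simp only [PySem.Dict.insert, h, if_pos]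
  simp only [PySem.Dict.erase, PySem.Dict.mk.injEq]
  exact filter_ne_map_overwrite l k v

theorem values_contains_iff (d : PySem.Dict Int Int) (h : d.keys.Nodup) (k : Int) :
    d.values.contains k = true ↔ ∃ v, d.get? v = some k := by
  constructor
  · intro hc
    rw [List.contains_eq_mem] at hc
    simp only [PySem.Dict.values, List.mem_map, decide_eq_true_eq] at hc
    obtain ⟨⟨v, w⟩, hp, hpk⟩ := hc
    cases hpk
    exact ⟨v, (PySem.Dict.get?_eq_some_iff_mem_items d v w h).2 hp⟩
  · rintro ⟨v, hv⟩
    rw [List.contains_eq_mem]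
    simp only [PySem.Dict.values, List.mem_map, decide_eq_true_eq]
    exact ⟨(v, k), (PySem.Dict.get?_eq_some_iff_mem_items d v k h).1 hv, rfl⟩

theorem repF_congr {g g' : Int → Option Int} {freq : PySem.Dict Int (PySem.Set Int)}
    (hg : ∀ v, g v = g' v) (h : RepF g freq) : RepF g' freq := by
  obtain ⟨h1, h2, h3⟩ := h
  refine ⟨h1, fun k => ?_, fun k s hs => ?_⟩
  · rw [h2 k]
    exact ⟨fun ⟨v, e⟩ => ⟨v, (hg v) ▸ e⟩, fun ⟨v, e⟩ => ⟨v, (hg v) ▸ e⟩⟩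
  · obtain ⟨hn, hm⟩ := h3 k s hs
    exact ⟨hn, fun v => by rw [← hg v]; exact hm v⟩

theorem rep_bucketRemove {g : Int → Option Int} {freq : PySem.Dict Int (PySem.Set Int)}
    {f value : Int} (h : RepF g freq) (hv : g value = some f) :
    RepF (fun v => if v = value then none else g v) (bucketRemove freq f value) := by
  obtain ⟨hnd, hcont, hget⟩ := h
  have hcf : freq.contains f = true := (hcont f).2 ⟨value, hv⟩
  have hsome : (freq.get? f).isSome := by rw [← PySem.Dict.contains_eq_isSome_get?]; exact hcf
  obtain ⟨s0, hs0⟩ := Option.isSome_iff_exists.1 hsome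
  obtain ⟨hnds0, hmem0⟩ := hget f s0 hs0
  have hgd : freq.getD f PySem.Set.empty = s0 := by
    rw [PySem.Dict.getD_eq_get?_getD, hs0]; rfl
  have hvmem : value ∈ s0 := (hmem0 value).2 hv
  have hg' : ∀ (v k : Int), ((if v = value then none else g v) = some k) ↔ (g v = some k ∧ v ≠ value) := by
    intro v k
    by_cases hvv : v = value
    · subst hvv; simp [hv]
    · simp [hvv]
  unfold bucketRemove
  rw [if_pos hcf]
  show RepF _
    (if PySem.Set.len ((freq.insert f (((freq.getD f PySem.Set.empty).remove? value).getD
        (freq.getD f PySem.Set.empty))).getD f PySem.Set.empty) = 0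
     then (freq.insert f (((freq.getD f PySem.Set.empty).remove? value).getD
        (freq.getD f PySem.Set.empty))).erase f
     else freq.insert f (((freq.getD f PySem.Set.empty).remove? value).getD
        (freq.getD f PySem.Set.empty)))
  rw [hgd, PySem.Set.remove?_of_mem hvmem]
  show RepF _
    (if PySem.Set.len ((freq.insert f (s0.discard value)).getD f PySem.Set.empty) = 0
     then (freq.insert f (s0.discard value)).erase f else freq.insert f (s0.discard value))
  rw [PySem.Dict.getD_insert_self]
  have hmem1 : ∀ v : Int, v ∈ s0.discard value ↔ (g v = some f ∧ v ≠ value) := by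
    intro v; rw [PySem.Set.mem_discard, hmem0]
  by_cases hlen : PySem.Set.len (s0.discard value) = 0
  · rw [if_pos hlen]
    have hempty : s0.discard value = [] := by
      rw [PySem.Set.len_eq] at hlen
      exact List.length_eq_zero_iff.1 (by exact_mod_cast hlen)
    refine ⟨nodup_keys_erase _ _ (PySem.Dict.nodup_keys_insert _ _ _ hnd), ?_, ?_⟩
    · intro k
      rw [contains_erase]
      by_cases hk : k = f
      · subst k
        rw [if_pos rfl]
        constructor
        · intro e; cases e
        · rintro ⟨v, hgv⟩
          obtain ⟨h1, h2⟩ := (hg' v f).1 hgv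
          have : v ∈ s0.discard value := (hmem1 v).2 ⟨h1, h2⟩
          rw [hempty] at this; cases this
      · rw [if_neg hk, PySem.Dict.contains_insert,
          show (k == f) = false by simpa using hk, Bool.false_or, hcont k]
        constructor
        · rintro ⟨v, hgv⟩
          have hvne : v ≠ value := by
            intro e; rw [e, hv] at hgv; exact hk (Option.some.inj hgv).symm
          exact ⟨v, (hg' v k).2 ⟨hgv, hvne⟩⟩
        · rintro ⟨v, hgv⟩
          exact ⟨v, ((hg' v k).1 hgv).1⟩
    · intro k s hs
      rw [get?_erase] at hs
      by_cases hk : k = f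
      · rw [if_pos hk] at hs; cases hs
      · rw [if_neg hk, PySem.Dict.get?_insert_of_ne _ _ hk] at hs
        obtain ⟨hn, hm⟩ := hget k s hs
        refine ⟨hn, fun v => ?_⟩
        rw [hg', hm]
        constructor
        · intro hgv
          refine ⟨hgv, ?_⟩
          intro e; rw [e, hv] at hgv; exact hk (Option.some.inj hgv).symm
        · exact fun h => h.1
  · rw [if_neg hlen]
    have hnonempty : s0.discard value ≠ [] := by
      intro e; rw [PySem.Set.len_eq, e] at hlen; exact hlen rfl
    refine ⟨PySem.Dict.nodup_keys_insert _ _ _ hnd, ?_, ?_⟩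
    · intro k
      rw [PySem.Dict.contains_insert]
      by_cases hk : k = f
      · subst k
        rw [show (f == f) = true by simp, Bool.true_or]
        constructor
        · intro _
          obtain ⟨w, hw⟩ := List.exists_mem_of_ne_nil _ hnonempty
          obtain ⟨h1, h2⟩ := (hmem1 w).1 hw
          exact ⟨w, (hg' w f).2 ⟨h1, h2⟩⟩
        · intro _; rfl
      · rw [show (k == f) = false by simpa using hk, Bool.false_or, hcont k]
        constructor
        · rintro ⟨v, hgv⟩
          have hvne : v ≠ value := by
            intro e; rw [e, hv] at hgv; exact hk (Option.some.inj hgv).symm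
          exact ⟨v, (hg' v k).2 ⟨hgv, hvne⟩⟩
        · rintro ⟨v, hgv⟩
          exact ⟨v, ((hg' v k).1 hgv).1⟩
    · intro k s hs
      rw [PySem.Dict.get?_insert] at hs
      by_cases hk : k = f
      · rw [if_pos hk] at hs
        cases Option.some.inj hs
        refine ⟨PySem.Set.nodup_discard _ _ hnds0, fun v => ?_⟩
        rw [hg', hmem1, hk]
      · rw [if_neg hk] at hs
        obtain ⟨hn, hm⟩ := hget k s hs
        refine ⟨hn, fun v => ?_⟩
        rw [hg', hm]
        constructor
        · intro hgv
          refine ⟨hgv, ?_⟩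
          intro e; rw [e, hv] at hgv; exact hk (Option.some.inj hgv).symm
        · exact fun h => h.1

theorem rep_bucketAdd {g : Int → Option Int} {freq : PySem.Dict Int (PySem.Set Int)}
    {k value : Int} (h : RepF g freq) (hv : g value = none) :
    RepF (fun v => if v = value then some k else g v) (bucketAdd freq k value) := by
  obtain ⟨hnd, hcont, hget⟩ := h
  unfold bucketAdd
  set freq1 := if freq.contains k = false then freq.insert k PySem.Set.empty else freq with hfreq1
  have hnd1 : freq1.keys.Nodup := by
    rw [hfreq1]; split
    · exact PySem.Dict.nodup_keys_insert _ _ _ hnd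
    · exact hnd
  have hne1 : ∀ k' : Int, k' ≠ k → freq1.get? k' = freq.get? k' := by
    intro k' hk'; rw [hfreq1]; split
    · exact PySem.Dict.get?_insert_of_ne _ _ hk'
    · rfl
  have hs0 : ∃ s0, freq1.get? k = some s0 ∧ freq1.getD k PySem.Set.empty = s0 ∧
      s0.Nodup ∧ (∀ v : Int, v ∈ s0 ↔ g v = some k) := by
    by_cases hck : freq.contains k = true
    · have : (freq.get? k).isSome := by rw [← PySem.Dict.contains_eq_isSome_get?]; exact hck
      obtain ⟨s0, hs0⟩ := Option.isSome_iff_exists.1 this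
      have h1 : freq1.get? k = some s0 := by rw [hfreq1]; split
        <;> simp_all
      obtain ⟨hn, hm⟩ := hget k s0 hs0
      exact ⟨s0, h1, by rw [PySem.Dict.getD_eq_get?_getD, h1]; rfl, hn, hm⟩
    · have hck' : freq.contains k = false := by simpa using hck
      have h1 : freq1.get? k = some PySem.Set.empty := by
        rw [hfreq1, if_pos hck']; exact PySem.Dict.get?_insert_self _ _ _
      refine ⟨PySem.Set.empty, h1, by rw [PySem.Dict.getD_eq_get?_getD, h1]; rfl, List.nodup_nil, ?_⟩
      intro v
      constructor
      · intro hmem; cases hmem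
      · intro hg
        exact absurd ((hcont k).2 ⟨v, hg⟩) (by simp [hck'])
  obtain ⟨s0, hget1, hgetD1, hnds0, hmem0⟩ := hs0
  show RepF _ (freq1.insert k ((freq1.getD k PySem.Set.empty).add value))
  rw [hgetD1]
  refine ⟨PySem.Dict.nodup_keys_insert _ _ _ hnd1, ?_, ?_⟩
  · intro k'
    rw [PySem.Dict.contains_insert]
    by_cases hk' : k' = k
    · subst hk'; simp only [BEq.rfl, Bool.true_or, true_iff]
      exact ⟨value, by simp⟩
    · rw [show (k' == k) = false by simpa using hk', Bool.false_or]
      have : freq1.contains k' = freq.contains k' := by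
        rw [PySem.Dict.contains_eq_isSome_get?, PySem.Dict.contains_eq_isSome_get?, hne1 k' hk']
      rw [this, hcont k']
      constructor
      · rintro ⟨v, hg⟩
        refine ⟨v, ?_⟩
        have hvv : v ≠ value := by intro e; rw [e, hv] at hg; cases hg
        simpa [hvv] using hg
      · rintro ⟨v, hg⟩
        have hg' : (if v = value then some k else g v) = some k' := hg
        by_cases hvv : v = value
        · rw [if_pos hvv] at hg'
          exact absurd (Option.some.inj hg').symm hk'
        · rw [if_neg hvv] at hg'
          exact ⟨v, hg'⟩
  · intro k' s hs
    rw [PySem.Dict.get?_insert] at hs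
    by_cases hk' : k' = k
    · rw [if_pos hk'] at hs
      cases Option.some.inj hs
      subst hk'
      refine ⟨PySem.Set.nodup_add _ _ hnds0, ?_⟩
      intro v
      rw [PySem.Set.mem_add]
      by_cases hvv : v = value
      · simp [hvv]
      · simp [hvv, hmem0 v]
    · rw [if_neg hk', hne1 k' hk'] at hs
      obtain ⟨hn, hm⟩ := hget k' s hs
      refine ⟨hn, fun v => ?_⟩
      show v ∈ s ↔ (if v = value then some k else g v) = some k'
      by_cases hvv : v = value
      · rw [if_pos hvv]
        constructor
        · intro hmem
          have hx := (hm v).1 hmem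
          rw [hvv, hv] at hx; cases hx
        · intro e
          exact absurd (Option.some.inj e).symm hk'
      · rw [if_neg hvv]; exact hm v

theorem step_eq (q : Int × Int) (answer : List Int) (arr : PySem.Dict Int Int)
    (freq : PySem.Dict Int (PySem.Set Int)) (h : InvAB arr freq) :
    (stepA (answer, arr, freq) q).1 = (stepB (answer, arr) q).1 ∧
    (stepA (answer, arr, freq) q).2.1 = (stepB (answer, arr) q).2 ∧
    InvAB (stepA (answer, arr, freq) q).2.1 (stepA (answer, arr, freq) q).2.2 := by
  obtain ⟨hnd, hpos, hrep⟩ := h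
  obtain ⟨command, value⟩ := q
  simp only [stepA, stepB]
  by_cases hc1 : command = 1
  · rw [if_pos hc1, if_pos hc1]
    by_cases hin : arr.contains value = false
    · rw [if_pos hin]
      have hget0 : arr.get? value = none := by
        have := PySem.Dict.contains_eq_isSome_get? arr value
        rw [hin] at this
        exact Option.not_isSome_iff_eq_none.1 (by rw [← this]; simp)
      have hgd : arr.getD value 0 = 0 := PySem.Dict.getD_of_not_contains _ _ hin
      rw [hgd]
      refine ⟨rfl, by norm_num, PySem.Dict.nodup_keys_insert _ _ _ hnd, ?_, ?_⟩
      · intro v k hk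
        rw [PySem.Dict.get?_insert] at hk
        by_cases hvv : v = value
        · rw [if_pos hvv] at hk; cases hk; norm_num
        · rw [if_neg hvv] at hk; exact hpos v k hk
      · refine repF_congr ?_ (rep_bucketAdd hrep hget0)
        intro v
        rw [PySem.Dict.get?_insert]
    · rw [if_neg hin]
      have hct : arr.contains value = true := by simpa using hin
      have hsome : (arr.get? value).isSome := by
        rw [← PySem.Dict.contains_eq_isSome_get?]; exact hct
      obtain ⟨f0, hf0⟩ := Option.isSome_iff_exists.1 hsome
      have hgd : arr.getD value 0 = f0 := by rw [PySem.Dict.getD_eq_get?_getD, hf0]; rfl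
      have hf0pos : 1 ≤ f0 := hpos value f0 hf0
      rw [hgd]
      refine ⟨rfl, rfl, PySem.Dict.nodup_keys_insert _ _ _ hnd, ?_, ?_⟩
      · intro v k hk
        rw [PySem.Dict.get?_insert] at hk
        by_cases hvv : v = value
        · rw [if_pos hvv] at hk
          have := Option.some.inj hk; omega
        · rw [if_neg hvv] at hk; exact hpos v k hk
      · rw [PySem.Dict.getD_insert_self]
        have h1 := rep_bucketRemove hrep hf0
        have h2 := rep_bucketAdd (k := f0 + 1) h1 (by rw [if_pos rfl])
        refine repF_congr ?_ h2
        intro v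
        rw [PySem.Dict.get?_insert]
        by_cases hvv : v = value <;> simp [hvv]
  · rw [if_neg hc1, if_neg hc1]
    by_cases hc2 : command = 2
    · rw [if_pos hc2, if_pos hc2]
      by_cases hct : arr.contains value = true
      · rw [if_pos hct]
        have hsome : (arr.get? value).isSome := by
          rw [← PySem.Dict.contains_eq_isSome_get?]; exact hct
        obtain ⟨f0, hf0⟩ := Option.isSome_iff_exists.1 hsome
        have hgd : arr.getD value 0 = f0 := by rw [PySem.Dict.getD_eq_get?_getD, hf0]; rfl
        have hf0pos : 1 ≤ f0 := hpos value f0 hf0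
        rw [hgd, PySem.Dict.getD_insert_self]
        by_cases hone : f0 = 1
        · subst hone
          rw [if_pos (by norm_num), if_neg (by norm_num), if_pos rfl, insert_erase_self _ _ _ hct]
          refine ⟨rfl, rfl, nodup_keys_erase _ _ hnd, ?_, ?_⟩
          · intro v k hk
            rw [get?_erase] at hk
            by_cases hvv : v = value
            · rw [if_pos hvv] at hk; cases hk
            · rw [if_neg hvv] at hk; exact hpos v k hk
          · refine repF_congr ?_ (rep_bucketRemove hrep hf0)
            intro v
            rw [get?_erase]
        · have hf2 : 2 ≤ f0 := by omega
          rw [if_neg (by omega), if_pos (by omega)]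
          refine ⟨rfl, rfl, PySem.Dict.nodup_keys_insert _ _ _ hnd, ?_, ?_⟩
          · intro v k hk
            rw [PySem.Dict.get?_insert] at hk
            by_cases hvv : v = value
            · rw [if_pos hvv] at hk
              have := Option.some.inj hk; omega
            · rw [if_neg hvv] at hk; exact hpos v k hk
          · have h1 := rep_bucketRemove hrep hf0
            have h2 := rep_bucketAdd (k := f0 - 1) h1 (by rw [if_pos rfl])
            refine repF_congr ?_ h2
            intro v
            rw [PySem.Dict.get?_insert]
            by_cases hvv : v = value <;> simp [hvv]
      · rw [if_neg hct]
        have hgd : arr.getD value 0 = 0 :=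
          PySem.Dict.getD_of_not_contains _ _ (by simpa using hct)
        rw [hgd, if_neg (by norm_num), if_neg (by norm_num)]
        exact ⟨rfl, rfl, hnd, hpos, hrep⟩
    · rw [if_neg hc2, if_neg hc2]
      by_cases hc3 : command = 3
      · rw [if_pos hc3, if_pos hc3]
        have hb : freq.contains value = arr.values.contains value := by
          by_cases hfc : freq.contains value = true
          · rw [hfc, eq_comm]
            exact (values_contains_iff _ hnd _).2 ((hrep.2.1 value).1 hfc)
          · have h1 : freq.contains value = false := by simpa using hfc
            have h2 : arr.values.contains value = false := by
              by_contra h'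
              have h'' : arr.values.contains value = true := by simpa using h'
              exact hfc ((hrep.2.1 value).2 ((values_contains_iff _ hnd _).1 h''))
            rw [h1, h2]
        rw [hb]
        exact ⟨rfl, rfl, hnd, hpos, hrep⟩
      · rw [if_neg hc3, if_neg hc3]
        exact ⟨rfl, rfl, hnd, hpos, hrep⟩

theorem fold_eq (qs : List (Int × Int)) : ∀ (answer : List Int) (arr : PySem.Dict Int Int)
    (freq : PySem.Dict Int (PySem.Set Int)), InvAB arr freq →
    (qs.foldl stepA (answer, arr, freq)).1 = (qs.foldl stepB (answer, arr)).1 := by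
  induction qs with
  | nil => intro answer arr freq _; rfl
  | cons q qs ih =>
    intro answer arr freq h
    obtain ⟨h1, h2, h3⟩ := step_eq q answer arr freq h
    simp only [List.foldl_cons]
    have hA : stepA (answer, arr, freq) q =
        ((stepA (answer, arr, freq) q).1, (stepA (answer, arr, freq) q).2.1,
         (stepA (answer, arr, freq) q).2.2) := rfl
    have hB : stepB (answer, arr) q = ((stepB (answer, arr) q).1, (stepB (answer, arr) q).2) := rfl
    rw [hA, hB, h1, h2]
    exact ih _ _ _ (h2 ▸ h3)

-- ===== VERDICT (by name: the statement is the Claim_ definition above) =====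
theorem freqQuery_spec : Claim_equal_freqQuery := by
  intro queries _
  show freqQuery queries = freqQuery_alt queries
  exact fold_eq queries [] PySem.Dict.empty PySem.Dict.empty
    ⟨by simp [PySem.Dict.keys_empty], by simp [PySem.Dict.get?_empty],
     by simp [PySem.Dict.keys_empty], by simp [PySem.Dict.contains_empty],
     by simp [PySem.Dict.get?_empty]⟩
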